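-- pv_equiv track=rewrite | github.com/esgaltur/pyobfuscator | pyobfuscate/utils.py | minify_code
-- ===== SOURCE A (Python) =====
-- def minify_code(source: str) -> str:
--     """
--     Basic minification of Python code.
--     Removes extra whitespace and blank lines.
--
--     Args:
--         source: Python source code
--
--     Returns:
--         Minified source code
--     """
--     lines = source.split('\n')
--     minified_lines = []
--
--     for line in lines:
--         # Remove trailing whitespace
--         line = line.rstrip()
--
--         # Skip completely empty lines (but keep lines with only indentation for blocks)
--         if line or (minified_lines and minified_lines[-1].strip().endswith(':')):
--             minified_lines.append(line)
--
--     # Remove consecutive blank lines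
--     result = []
--     prev_blank = False
--     for line in minified_lines:
--         is_blank = not line.strip()
--         if not (is_blank and prev_blank):
--             result.append(line)
--         prev_blank = is_blank
--
--     return '\n'.join(result)
-- ===== SOURCE B (Python) =====
-- def minify_code(source: str) -> str:
--     """Single fused pass: tracks last kept (rstripped) line and previous-blank flag."""
--     result = []
--     last_min = None
--     prev_blank = False
--     for raw in source.split('\n'):
--         line = raw.rstrip()
--         if line or (last_min is not None and last_min.strip().endswith(':')):
--             last_min = line
--             is_blank = not line.strip()
--             if not (is_blank and prev_blank):
--                 result.append(line)
--             prev_blank = is_blank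
--     return '\n'.join(result)
-- ===== Notes on version B (the rewrite author's own statement) =====
-- stated objective: simpler
-- what changed: A's two sequential passes (filter kept lines into an intermediate list, then collapse consecutive blanks) are fused into one state-carrying pass that tracks the last kept line and a previous-blank flag, with no intermediate list.
import Mathlib
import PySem

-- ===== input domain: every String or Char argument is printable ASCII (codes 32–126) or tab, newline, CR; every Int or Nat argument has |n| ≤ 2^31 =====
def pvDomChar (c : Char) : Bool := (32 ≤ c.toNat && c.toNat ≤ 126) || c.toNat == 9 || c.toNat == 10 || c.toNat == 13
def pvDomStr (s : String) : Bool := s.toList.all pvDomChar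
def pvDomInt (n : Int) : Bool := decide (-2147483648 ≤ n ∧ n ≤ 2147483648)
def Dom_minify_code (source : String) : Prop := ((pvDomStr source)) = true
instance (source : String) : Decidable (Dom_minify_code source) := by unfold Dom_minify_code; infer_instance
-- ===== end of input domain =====

-- B fuses A's two passes (keep-line filter, then blank-collapse) into one state-carrying pass;
-- objective: simpler (one traversal, no intermediate list), same asymptotic cost.

-- ===== PORT A =====
-- pass 1 body: keep line if nonempty after rstrip, or last kept line (minified_lines[-1]) ends with ':'
def pvStepA1 (acc : List (List Char)) (raw : List Char) : List (List Char) :=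
  let line := PySem.Chars.rstrip raw
  if (!line.isEmpty) ||
     ((!acc.isEmpty) && PySem.Chars.endswith (PySem.Chars.strip ((acc.getLast?).getD [])) [':'])
  then acc ++ [line] else acc

-- pass 2 body: drop a blank line after a blank line; state = (prev_blank, result)
def pvStepA2 (st : Bool × List (List Char)) (line : List Char) : Bool × List (List Char) :=
  let is_blank := (PySem.Chars.strip line).isEmpty
  (is_blank, if !(is_blank && st.1) then st.2 ++ [line] else st.2)

def minify_code (source : String) : String :=
  let lines := PySem.Chars.splitOn source.toList [Char.ofNat 10]
  let minified_lines := lines.foldl pvStepA1 []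
  let st := minified_lines.foldl pvStepA2 (false, [])
  String.ofList (PySem.Chars.join [Char.ofNat 10] st.2)

-- ===== PORT B =====
-- 'last_min is not None and last_min.strip().endswith(":")'
def pvColonB (lm : Option (List Char)) : Bool :=
  match lm with
  | some x => PySem.Chars.endswith (PySem.Chars.strip x) [':']
  | none => false

-- single-pass body; state = (last pass-1-kept line, previous-kept-line-blank flag, output lines)
def pvStepB (st : Option (List Char) × Bool × List (List Char)) (raw : List Char) :
    Option (List Char) × Bool × List (List Char) :=
  let line := PySem.Chars.rstrip raw
  if (!line.isEmpty) || pvColonB st.1 then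
    let is_blank := (PySem.Chars.strip line).isEmpty
    (some line, is_blank, if is_blank && st.2.1 then st.2.2 else st.2.2 ++ [line])
  else st

def minify_code_alt (source : String) : String :=
  let st := (PySem.Chars.splitOn source.toList [Char.ofNat 10]).foldl pvStepB (none, false, [])
  String.ofList (PySem.Chars.join [Char.ofNat 10] st.2.2)

-- ===== PRECONDITION & SPEC =====
def Spec_minify_code (source : String) (out : String) : Prop := out = minify_code_alt source
instance (source : String) (out : String) : Decidable (Spec_minify_code source out) := by unfold Spec_minify_code; infer_instance

-- ===== CLAIM (what is proved, stated in full; the proofs are below) =====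
def Claim_equal_minify_code : Prop := ∀ (source : String), Dom_minify_code source → Spec_minify_code source (minify_code source)

-- ===== LEMMAS AND PROOFS =====

-- reference "kept lines" function: pass 1 parametrised by the last kept line (none = nothing kept yet)
def pvP1 : List (List Char) → Option (List Char) → List (List Char)
  | [], _ => []
  | raw :: rest, lm =>
    let line := PySem.Chars.rstrip raw
    if (!line.isEmpty) || pvColonB lm then line :: pvP1 rest (some line) else pvP1 rest lm

-- reference blank-collapse function, parametrised by the previous-blank flag
def pvP2 : List (List Char) → Bool → List (List Char)
  | [], _ => []
  | line :: rest, pb =>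
    let b := (PySem.Chars.strip line).isEmpty
    if b && pb then pvP2 rest b else line :: pvP2 rest b

-- invariant tying A's pass-1 accumulator to B's Option state
def pvGood (acc : List (List Char)) (lm : Option (List Char)) : Prop :=
  match lm with
  | none => acc = []
  | some x => acc.getLast? = some x

lemma pvA1 (lines : List (List Char)) :
    ∀ (acc : List (List Char)) (lm : Option (List Char)), pvGood acc lm →
    lines.foldl pvStepA1 acc = acc ++ pvP1 lines lm := by
  induction lines with
  | nil => intro acc lm _; simp [pvP1]
  | cons raw rest ih =>
    intro acc lm hg
    simp only [List.foldl_cons, pvP1, pvStepA1]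
    have hcond : ((!(PySem.Chars.rstrip raw).isEmpty) ||
        ((!acc.isEmpty) && PySem.Chars.endswith (PySem.Chars.strip ((acc.getLast?).getD [])) [':']))
      = ((!(PySem.Chars.rstrip raw).isEmpty) || pvColonB lm) := by
      cases lm with
      | none => simp [pvGood] at hg; subst hg; simp [pvColonB]
      | some x =>
        simp only [pvGood] at hg
        have hne : acc.isEmpty = false := by
          cases acc with
          | nil => simp at hg
          | cons a as => rfl
        simp [hg, hne, pvColonB]
    rw [hcond]
    by_cases h : ((!(PySem.Chars.rstrip raw).isEmpty) || pvColonB lm) = true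
    · rw [if_pos h, if_pos h,
        ih (acc ++ [PySem.Chars.rstrip raw]) (some (PySem.Chars.rstrip raw)) (by simp [pvGood])]
      simp
    · rw [if_neg h, if_neg h]
      exact ih acc lm hg

lemma pvA2 (m : List (List Char)) :
    ∀ (pb : Bool) (res : List (List Char)),
    (m.foldl pvStepA2 (pb, res)).2 = res ++ pvP2 m pb := by
  induction m with
  | nil => intro pb res; simp [pvP2]
  | cons line rest ih =>
    intro pb res
    simp only [List.foldl_cons, pvP2, pvStepA2]
    by_cases hb : ((PySem.Chars.strip line).isEmpty && pb) = true
    · simpa [hb] using ih ((PySem.Chars.strip line).isEmpty) res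
    · simp only [Bool.not_eq_true] at hb
      simpa [hb] using ih ((PySem.Chars.strip line).isEmpty) (res ++ [line])

lemma pvB (lines : List (List Char)) :
    ∀ (lm : Option (List Char)) (pb : Bool) (res : List (List Char)),
    (lines.foldl pvStepB (lm, pb, res)).2.2 = res ++ pvP2 (pvP1 lines lm) pb := by
  induction lines with
  | nil => intro lm pb res; simp [pvP1, pvP2]
  | cons raw rest ih =>
    intro lm pb res
    simp only [List.foldl_cons, pvP1, pvStepB]
    by_cases h : ((!(PySem.Chars.rstrip raw).isEmpty) || pvColonB lm) = true
    · rw [if_pos h, if_pos h, ih]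
      simp only [pvP2]
      by_cases hb : ((PySem.Chars.strip (PySem.Chars.rstrip raw)).isEmpty && pb) = true
      · simp [hb]
      · simp only [Bool.not_eq_true] at hb
        simp [hb]
    · rw [if_neg h, if_neg h]
      exact ih lm pb res

-- ===== VERDICT (by name: the statement is the Claim_ definition above) =====
theorem minify_code_spec : Claim_equal_minify_code := by
  intro source _
  unfold Spec_minify_code minify_code minify_code_alt
  dsimp only
  rw [pvA1 _ [] none rfl, List.nil_append, pvA2 _ false [], List.nil_append,
      pvB _ none false [], List.nil_append]
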